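-- pv_equiv track=rewrite | github.com/Asz69420/autoquant-v2 | scripts/build_cycle_orders.py | pick_concept_pack
-- ===== SOURCE A (Python) =====
-- CONCEPT_PACKS = [
--     [
--         "trend pullback continuation after deeper value reclaim into structural support",
--         "volatility squeeze expansion confirmed by persistence instead of first breakout bar",
--         "failed breakdown reclaim that must hold before continuation entry",
--     ],
--     [
--         "range-failure reversal after multi-bar breakout loses acceptance and re-enters balance",
--         "trend reset continuation after a deeper pullback instead of shallow ema-touch logic",
--         "compression fakeout into re-expansion with directional confirmation",
--     ],
--     [
--         "state-change momentum after regime improvement and post-break hold",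
--         "mean reversion from exhaustion only when structure reaccepts prior value",
--         "breakout continuation with delayed entry after retest rather than immediate trigger",
--     ],
--     [
--         "opening-range or session-window continuation when a specific session structurally dominates follow-through",
--         "inventory-reset continuation after flush-and-reclaim rather than static oversold bounce logic",
--         "post-expansion partial-profit runner structure that keeps a core position for trend persistence",
--     ],
--     [
--         "scale-in around value recovery when confirmation improves across bars instead of one-shot all-in timing",
--         "trend continuation with asymmetric exit logic where trigger, risk, and exit indicators play different roles",
--         "retest-and-hold continuation that de-risks by time if expansion fails to appear fast enough",
--     ],
-- ]
--
-- def pick_concept_pack(cycle_id: int, prior_status: dict) -> list[str]: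
--     prior_concepts = ((prior_status.get("exploration_targets") or {}).get("concepts") or []) if isinstance(prior_status, dict) else []
--     start_idx = int(cycle_id or 0) % len(CONCEPT_PACKS)
--     for offset in range(len(CONCEPT_PACKS)):
--         pack = CONCEPT_PACKS[(start_idx + offset) % len(CONCEPT_PACKS)]
--         if pack != prior_concepts:
--             return pack
--     return CONCEPT_PACKS[start_idx]
-- ===== SOURCE B (Python) =====
-- CONCEPT_PACKS = [
--     [
--         "trend pullback continuation after deeper value reclaim into structural support",
--         "volatility squeeze expansion confirmed by persistence instead of first breakout bar",
--         "failed breakdown reclaim that must hold before continuation entry",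
--     ],
--     [
--         "range-failure reversal after multi-bar breakout loses acceptance and re-enters balance",
--         "trend reset continuation after a deeper pullback instead of shallow ema-touch logic",
--         "compression fakeout into re-expansion with directional confirmation",
--     ],
--     [
--         "state-change momentum after regime improvement and post-break hold",
--         "mean reversion from exhaustion only when structure reaccepts prior value",
--         "breakout continuation with delayed entry after retest rather than immediate trigger",
--     ],
--     [
--         "opening-range or session-window continuation when a specific session structurally dominates follow-through",
--         "inventory-reset continuation after flush-and-reclaim rather than static oversold bounce logic",
--         "post-expansion partial-profit runner structure that keeps a core position for trend persistence",
--     ],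
--     [
--         "scale-in around value recovery when confirmation improves across bars instead of one-shot all-in timing",
--         "trend continuation with asymmetric exit logic where trigger, risk, and exit indicators play different roles",
--         "retest-and-hold continuation that de-risks by time if expansion fails to appear fast enough",
--     ],
-- ]
--
--
-- def pick_concept_pack(cycle_id: int, prior_status: dict) -> list[str]:
--     # The packs are pairwise distinct, so the rotation slot is wrong only when it
--     # equals the prior pack, in which case the next slot must differ: no loop needed.
--     prior_concepts = ((prior_status.get("exploration_targets") or {}).get("concepts") or []) if isinstance(prior_status, dict) else []
--     n = len(CONCEPT_PACKS)
--     start_idx = int(cycle_id or 0) % n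
--     pack = CONCEPT_PACKS[start_idx]
--     if pack != prior_concepts:
--         return pack
--     return CONCEPT_PACKS[(start_idx + 1) % n]
-- ===== Notes on version B (the rewrite author's own statement) =====
-- stated objective: simpler
-- what changed: Replaced A's scan over all rotation offsets with a closed-form two-case pick: take the rotation slot, and only if it equals the prior pack take the next slot, which is guaranteed distinct since the packs are pairwise distinct.
import Mathlib
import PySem

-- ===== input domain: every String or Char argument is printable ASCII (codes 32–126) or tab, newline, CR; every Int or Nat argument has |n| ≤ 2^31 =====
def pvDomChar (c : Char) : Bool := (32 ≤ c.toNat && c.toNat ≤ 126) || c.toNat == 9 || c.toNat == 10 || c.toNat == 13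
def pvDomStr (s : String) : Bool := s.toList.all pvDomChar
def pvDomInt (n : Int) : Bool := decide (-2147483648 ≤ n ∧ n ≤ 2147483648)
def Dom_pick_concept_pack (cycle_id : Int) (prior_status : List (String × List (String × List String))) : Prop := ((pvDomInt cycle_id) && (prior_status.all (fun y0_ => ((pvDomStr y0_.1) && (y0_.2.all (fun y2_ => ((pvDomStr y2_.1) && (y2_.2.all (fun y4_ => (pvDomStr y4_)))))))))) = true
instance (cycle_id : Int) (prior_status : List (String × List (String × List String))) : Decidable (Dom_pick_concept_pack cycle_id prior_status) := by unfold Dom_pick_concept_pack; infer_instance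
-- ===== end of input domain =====

-- B replaces A's scan over all rotation offsets with a closed-form two-case pick
-- (rotation slot, or the next slot when that equals the prior pack), valid because
-- the packs are pairwise distinct; objective: simpler.

-- module constant CONCEPT_PACKS (shared by both Python files)
def pvCONCEPT_PACKS : List (List String) := [
  [ "trend pullback continuation after deeper value reclaim into structural support",
    "volatility squeeze expansion confirmed by persistence instead of first breakout bar",
    "failed breakdown reclaim that must hold before continuation entry" ],
  [ "range-failure reversal after multi-bar breakout loses acceptance and re-enters balance",
    "trend reset continuation after a deeper pullback instead of shallow ema-touch logic",
    "compression fakeout into re-expansion with directional confirmation" ],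
  [ "state-change momentum after regime improvement and post-break hold",
    "mean reversion from exhaustion only when structure reaccepts prior value",
    "breakout continuation with delayed entry after retest rather than immediate trigger" ],
  [ "opening-range or session-window continuation when a specific session structurally dominates follow-through",
    "inventory-reset continuation after flush-and-reclaim rather than static oversold bounce logic",
    "post-expansion partial-profit runner structure that keeps a core position for trend persistence" ],
  [ "scale-in around value recovery when confirmation improves across bars instead of one-shot all-in timing",
    "trend continuation with asymmetric exit logic where trigger, risk, and exit indicators play different roles",
    "retest-and-hold continuation that de-risks by time if expansion fails to appear fast enough" ] ]

-- prior_concepts extraction shared verbatim by both Pythons: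
-- ((prior_status.get("exploration_targets") or {}).get("concepts") or []); the
-- isinstance(prior_status, dict) guard is always true under the type convention.
-- 'or {}' / 'or []': None and the empty dict/list both become []; getD [] is exact.
def pvPriorConcepts (prior_status : List (String × List (String × List String))) : List String :=
  let et := ((PySem.Dict.mk prior_status).get? "exploration_targets").getD []
  ((PySem.Dict.mk et).get? "concepts").getD []

-- ===== PORT A =====
-- A's for-loop with early return, as a recursion over range(len(CONCEPT_PACKS))
def pvPickLoopA (start_idx : Int) (prior : List String) : List Int → Option (List String)
  | [] => none
  | o :: rest =>
    -- CONCEPT_PACKS[(start_idx + offset) % len(CONCEPT_PACKS)] — index always in range, getD [] unreachable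
    let pack := (PySem.List.pyGet? pvCONCEPT_PACKS (PySem.Int.mod (start_idx + o) (pvCONCEPT_PACKS.length : Int))).getD []
    if pack ≠ prior then some pack else pvPickLoopA start_idx prior rest

def pick_concept_pack (cycle_id : Int) (prior_status : List (String × List (String × List String))) : List String :=
  let prior_concepts := pvPriorConcepts prior_status
  -- int(cycle_id or 0) = cycle_id (0 stays 0)
  let start_idx := PySem.Int.mod (if cycle_id = 0 then 0 else cycle_id) (pvCONCEPT_PACKS.length : Int)
  match pvPickLoopA start_idx prior_concepts (PySem.List.pyRange 0 (pvCONCEPT_PACKS.length : Int) 1) with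
  | some p => p
  | none => (PySem.List.pyGet? pvCONCEPT_PACKS start_idx).getD []

-- ===== PORT B =====
def pick_concept_pack_alt (cycle_id : Int) (prior_status : List (String × List (String × List String))) : List String :=
  let prior_concepts := pvPriorConcepts prior_status
  let n : Int := (pvCONCEPT_PACKS.length : Int)
  let start_idx := PySem.Int.mod (if cycle_id = 0 then 0 else cycle_id) n
  let pack := (PySem.List.pyGet? pvCONCEPT_PACKS start_idx).getD []
  if pack ≠ prior_concepts then pack
  else (PySem.List.pyGet? pvCONCEPT_PACKS (PySem.Int.mod (start_idx + 1) n)).getD []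

-- ===== PRECONDITION & SPEC =====
def Spec_pick_concept_pack (cycle_id : Int) (prior_status : List (String × List (String × List String))) (out : List String) : Prop := out = pick_concept_pack_alt cycle_id prior_status
instance (cycle_id : Int) (prior_status : List (String × List (String × List String))) (out : List String) : Decidable (Spec_pick_concept_pack cycle_id prior_status out) := by unfold Spec_pick_concept_pack; infer_instance

-- ===== CLAIM (what is proved, stated in full; the proofs are below) =====
def Claim_equal_pick_concept_pack : Prop := ∀ (cycle_id : Int) (prior_status : List (String × List (String × List String))), Dom_pick_concept_pack cycle_id prior_status → Spec_pick_concept_pack cycle_id prior_status (pick_concept_pack cycle_id prior_status)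

-- ===== LEMMAS AND PROOFS =====

-- core: for any in-range start index, A's loop agrees with B's two-case pick
lemma pvLoop_eq_closed (s : Int) (h0 : 0 ≤ s) (h5 : s < 5) (p : List String) :
    (match pvPickLoopA s p (PySem.List.pyRange 0 (pvCONCEPT_PACKS.length : Int) 1) with
      | some q => q
      | none => (PySem.List.pyGet? pvCONCEPT_PACKS s).getD []) =
    (if (PySem.List.pyGet? pvCONCEPT_PACKS s).getD [] ≠ p
      then (PySem.List.pyGet? pvCONCEPT_PACKS s).getD []
      else (PySem.List.pyGet? pvCONCEPT_PACKS (PySem.Int.mod (s + 1) (pvCONCEPT_PACKS.length : Int))).getD []) := by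
  have hlen : ((pvCONCEPT_PACKS.length : Int)) = 5 := by norm_num [pvCONCEPT_PACKS]
  simp only [hlen]
  by_cases hp : (PySem.List.pyGet? pvCONCEPT_PACKS s).getD [] = p
  · -- the rotation slot equals the prior pack; the next slot is distinct, so both sides pick it
    have hs : s = 0 ∨ s = 1 ∨ s = 2 ∨ s = 3 ∨ s = 4 := by omega
    subst hp
    rcases hs with h | h | h | h | h <;> subst h <;> decide
  · -- the rotation slot differs from the prior pack; both sides return it at once
    rw [PySem.List.pyRange_one_cons (by norm_num)]
    simp only [pvPickLoopA, hlen]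
    simp [hp, Int.emod_eq_of_lt h0 h5]

-- ===== VERDICT (by name: the statement is the Claim_ definition above) =====
theorem pick_concept_pack_spec : Claim_equal_pick_concept_pack := by
  intro cycle_id prior_status _
  unfold Spec_pick_concept_pack pick_concept_pack pick_concept_pack_alt
  apply pvLoop_eq_closed
  · exact PySem.Int.mod_nonneg _ (by norm_num [pvCONCEPT_PACKS])
  · have := PySem.Int.mod_lt (a := (if cycle_id = 0 then 0 else cycle_id)) (b := (pvCONCEPT_PACKS.length : Int)) (by norm_num [pvCONCEPT_PACKS])
    calc PySem.Int.mod _ _ < (pvCONCEPT_PACKS.length : Int) := this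
      _ = 5 := by norm_num [pvCONCEPT_PACKS]
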